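-- pv_equiv track=rewrite | github.com/OlivierFacelina/President | script2.py | trouver_cartes_gagnantes
-- ===== SOURCE A (Python) =====
-- VALEURS = {'2': 2, '3': 3, '4': 4, '5': 5, '6': 6, '7': 7, '8': 8, '9': 9, '10': 10, 'valet': 11, 'dame': 12, 'roi': 13, 'as': 14}
--
-- def trouver_cartes_gagnantes(cartes_jouees):
--     """Trouve les cartes gagnantes"""
--     cartes_gagnantes = []
--     for carte in cartes_jouees:
--         if not cartes_gagnantes or VALEURS[carte[:-10]] > VALEURS[cartes_gagnantes[0][:-10]]:
--             cartes_gagnantes = [carte]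
--         elif VALEURS[carte[:-10]] == VALEURS[cartes_gagnantes[0][:-10]]:
--             cartes_gagnantes.append(carte)
--     return cartes_gagnantes
-- ===== SOURCE B (Python) =====
-- VALEURS = {'2': 2, '3': 3, '4': 4, '5': 5, '6': 6, '7': 7, '8': 8, '9': 9, '10': 10, 'valet': 11, 'dame': 12, 'roi': 13, 'as': 14}
--
-- def trouver_cartes_gagnantes(cartes_jouees):
--     """Trouve les cartes gagnantes"""
--     if len(cartes_jouees) < 2:
--         # with fewer than two cards there is nothing to compare: they all win
--         return list(cartes_jouees)
--     m = max(VALEURS[c[:-10]] for c in cartes_jouees)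
--     return [c for c in cartes_jouees if VALEURS[c[:-10]] == m]
-- ===== Notes on version B (the rewrite author's own statement) =====
-- stated objective: simpler
-- what changed: Replaces A's running-winner list with reset/append control flow by a trivial base case for fewer than two cards, then a max-reduction over the card values followed by a filter keeping the cards attaining that maximum.
import Mathlib
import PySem

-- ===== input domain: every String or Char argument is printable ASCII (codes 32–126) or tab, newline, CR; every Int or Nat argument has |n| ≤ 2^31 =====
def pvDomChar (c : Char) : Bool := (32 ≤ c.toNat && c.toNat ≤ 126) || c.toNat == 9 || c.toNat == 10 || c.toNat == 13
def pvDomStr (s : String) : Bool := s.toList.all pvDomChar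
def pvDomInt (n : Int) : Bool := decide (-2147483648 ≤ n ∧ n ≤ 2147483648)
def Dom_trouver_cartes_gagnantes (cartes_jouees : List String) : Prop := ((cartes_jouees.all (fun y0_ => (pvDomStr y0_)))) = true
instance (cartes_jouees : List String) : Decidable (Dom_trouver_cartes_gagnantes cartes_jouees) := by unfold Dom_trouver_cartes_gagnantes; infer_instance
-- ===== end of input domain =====

-- B replaces A's running-winner list (reset on a higher card, append on a tie) by a
-- max-reduction over the card values followed by a filter: simpler decomposition, same cost.

-- ===== PORT A =====
-- the module constant VALEURS
def pvValeurs : PySem.Dict String Int := PySem.Dict.ofList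
  [("2", 2), ("3", 3), ("4", 4), ("5", 5), ("6", 6), ("7", 7), ("8", 8), ("9", 9),
   ("10", 10), ("valet", 11), ("dame", 12), ("roi", 13), ("as", 14)]

-- VALEURS[carte[:-10]]; KeyError (lookup = none) is excluded by Pre_, getD 0 totalizes
def pvVal (carte : String) : Int :=
  (pvValeurs.get? (PySem.Str.slice carte none (some (-10)))).getD 0

def trouver_cartes_gagnantes (cartes_jouees : List String) : List String :=
  cartes_jouees.foldl (fun cartes_gagnantes carte =>
    match cartes_gagnantes with
    | [] => [carte]
    | h :: _ =>
      if pvVal carte > pvVal h then [carte]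
      else if pvVal carte = pvVal h then cartes_gagnantes ++ [carte]
      else cartes_gagnantes) []

-- ===== PORT B =====
def trouver_cartes_gagnantes_alt (cartes_jouees : List String) : List String :=
  if cartes_jouees.length < 2 then cartes_jouees
  else match cartes_jouees with
  | [] => []
  | c0 :: rest =>
    let m := rest.foldl (fun a c => max a (pvVal c)) (pvVal c0)
    (c0 :: rest).filter (fun c => pvVal c == m)

-- ===== PRECONDITION & SPEC =====
-- Pre_ excludes exactly the inputs where Python A raises KeyError: lists of at least two
-- cards one of which has a prefix carte[:-10] that is not a key of VALEURS (on shorter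
-- lists A's `or` short-circuits and no lookup happens, so A always returns there).
def Pre_trouver_cartes_gagnantes (cartes_jouees : List String) : Prop :=
  cartes_jouees.length ≤ 1 ∨
    ∀ c ∈ cartes_jouees, pvValeurs.contains (PySem.Str.slice c none (some (-10))) = true
instance (cartes_jouees : List String) : Decidable (Pre_trouver_cartes_gagnantes cartes_jouees) := by
  unfold Pre_trouver_cartes_gagnantes; infer_instance

def pvWitness_trouver_cartes_gagnantes : List String :=
  ["as de coeur ", "roi de pique ", "as de coeur "]

def Spec_trouver_cartes_gagnantes (cartes_jouees : List String) (out : List String) : Prop := out = trouver_cartes_gagnantes_alt cartes_jouees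
instance (cartes_jouees : List String) (out : List String) : Decidable (Spec_trouver_cartes_gagnantes cartes_jouees out) := by unfold Spec_trouver_cartes_gagnantes; infer_instance

-- ===== CLAIM (what is proved, stated in full; the proofs are below) =====
def Claim_equal_trouver_cartes_gagnantes : Prop := ∀ (cartes_jouees : List String), Dom_trouver_cartes_gagnantes cartes_jouees → Pre_trouver_cartes_gagnantes cartes_jouees → Spec_trouver_cartes_gagnantes cartes_jouees (trouver_cartes_gagnantes cartes_jouees)

-- ===== LEMMAS AND PROOFS =====

-- named copies of the two loop bodies (definitionally equal to the lambdas in the ports)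
def pvStep (acc : List String) (carte : String) : List String :=
  match acc with
  | [] => [carte]
  | h :: _ =>
    if pvVal carte > pvVal h then [carte]
    else if pvVal carte = pvVal h then acc ++ [carte]
    else acc

def pvMaxF (a : Int) (t : List String) : Int :=
  t.foldl (fun a c => max a (pvVal c)) a

lemma pvMaxF_append (a : Int) (t : List String) (x : String) :
    pvMaxF a (t ++ [x]) = max (pvMaxF a t) (pvVal x) := by
  simp [pvMaxF, List.foldl_append]

lemma le_pvMaxF (a : Int) (t : List String) : a ≤ pvMaxF a t := by
  induction t generalizing a with
  | nil => simp [pvMaxF]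
  | cons c t ih =>
    have := ih (max a (pvVal c))
    simp only [pvMaxF, List.foldl_cons] at *
    exact le_trans (le_max_left _ _) this

lemma mem_le_pvMaxF (a : Int) (t : List String) (c : String) (hc : c ∈ t) :
    pvVal c ≤ pvMaxF a t := by
  induction t generalizing a with
  | nil => cases hc
  | cons d t ih =>
    rcases List.mem_cons.mp hc with h | h
    · subst h
      simp only [pvMaxF, List.foldl_cons]
      exact le_trans (le_max_right _ _) (le_pvMaxF _ _)
    · simpa only [pvMaxF, List.foldl_cons] using ih (max a (pvVal d)) h

lemma pvMaxF_attained (a : Int) (t : List String) :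
    pvMaxF a t = a ∨ ∃ c ∈ t, pvMaxF a t = pvVal c := by
  induction t generalizing a with
  | nil => left; rfl
  | cons c t ih =>
    have h := ih (max a (pvVal c))
    simp only [pvMaxF, List.foldl_cons] at h ⊢
    rcases h with h | ⟨d, hd, hv⟩
    · rcases max_choice a (pvVal c) with hm | hm
      · left; rw [h, hm]
      · right; exact ⟨c, List.mem_cons_self, by rw [h, hm]⟩
    · right; exact ⟨d, List.mem_cons_of_mem _ hd, hv⟩

-- the invariant: after processing c0::rest, the accumulator is exactly the filter of the
-- processed prefix by its running maximum
lemma pv_loop_inv (xs : List String) : ∀ (c0 : String) (rest : List String),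
    List.foldl pvStep ((c0 :: rest).filter (fun c => pvVal c == pvMaxF (pvVal c0) rest)) xs
      = (c0 :: (rest ++ xs)).filter (fun c => pvVal c == pvMaxF (pvVal c0) (rest ++ xs)) := by
  induction xs with
  | nil => intro c0 rest; simp
  | cons x xs ih =>
    intro c0 rest
    set M := pvMaxF (pvVal c0) rest with hM
    -- the filtered accumulator is nonempty and its head has value M
    have hatt : ∃ c ∈ c0 :: rest, pvVal c = M := by
      rcases pvMaxF_attained (pvVal c0) rest with h | ⟨c, hc, hv⟩
      · exact ⟨c0, List.mem_cons_self, h.symm⟩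
      · exact ⟨c, List.mem_cons_of_mem _ hc, hv.symm⟩
    have hle : ∀ c ∈ c0 :: rest, pvVal c ≤ M := by
      intro c hc
      rcases List.mem_cons.mp hc with h | h
      · subst h; exact le_pvMaxF _ _
      · exact mem_le_pvMaxF _ _ _ h
    obtain ⟨w, hw, hwv⟩ := hatt
    have hne : (c0 :: rest).filter (fun c => pvVal c == M) ≠ [] := by
      intro hnil
      have : w ∈ (c0 :: rest).filter (fun c => pvVal c == M) :=
        List.mem_filter.mpr ⟨hw, by simp [hwv]⟩
      rw [hnil] at this; cases this
    obtain ⟨h, t, hft⟩ := List.exists_cons_of_ne_nil hne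
    have hhM : pvVal h = M := by
      have : h ∈ (c0 :: rest).filter (fun c => pvVal c == M) := by
        rw [hft]; exact List.mem_cons_self
      simpa using (List.mem_filter.mp this).2
    have hMapp : pvMaxF (pvVal c0) (rest ++ [x]) = max M (pvVal x) := by
      rw [pvMaxF_append, ← hM]
    rcases lt_trichotomy M (pvVal x) with hlt | heq | hgt
    · -- new strict maximum: accumulator resets to [x]
      have hstep : pvStep ((c0 :: rest).filter (fun c => pvVal c == M)) x = [x] := by
        rw [hft]; simp [pvStep, hhM, hlt]
      have hfilt : (c0 :: (rest ++ [x])).filter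
          (fun c => pvVal c == pvMaxF (pvVal c0) (rest ++ [x])) = [x] := by
        rw [hMapp, max_eq_right hlt.le]
        have : (c0 :: rest).filter (fun c => pvVal c == pvVal x) = [] := by
          rw [List.filter_eq_nil_iff]
          intro c hc
          have := hle c hc
          simp only [beq_iff_eq]
          omega
        have hsplit : (c0 :: (rest ++ [x])) = (c0 :: rest) ++ [x] := by simp
        rw [hsplit, List.filter_append, this]
        simp
      calc List.foldl pvStep ((c0 :: rest).filter (fun c => pvVal c == M)) (x :: xs)
          = List.foldl pvStep [x] xs := by rw [List.foldl_cons, hstep]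
        _ = List.foldl pvStep ((x :: []).filter (fun c => pvVal c == pvMaxF (pvVal x) [])) xs := by
              simp [pvMaxF]
        _ = (x :: ([] ++ xs)).filter (fun c => pvVal c == pvMaxF (pvVal x) ([] ++ xs)) := ih x []
        _ = (c0 :: (rest ++ (x :: xs))).filter
              (fun c => pvVal c == pvMaxF (pvVal c0) (rest ++ (x :: xs))) := by
              have hM' : pvMaxF (pvVal x) xs = pvMaxF (pvVal c0) (rest ++ (x :: xs)) := by
                have h1 : rest ++ (x :: xs) = (rest ++ [x]) ++ xs := by simp
                rw [h1]
                simp only [pvMaxF, List.foldl_append]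
                congr 1
                have : pvMaxF (pvVal c0) (rest ++ [x]) = pvVal x := by
                  rw [hMapp, max_eq_right hlt.le]
                simpa [pvMaxF, List.foldl_append] using this
              simp only [List.nil_append]
              rw [hM']
              have hnil1 : (c0 :: rest).filter
                  (fun c => pvVal c == pvMaxF (pvVal c0) (rest ++ (x :: xs))) = [] := by
                rw [List.filter_eq_nil_iff]
                intro c hc
                have h2 : pvVal c ≤ M := hle c hc
                have h3 : pvVal x ≤ pvMaxF (pvVal c0) (rest ++ (x :: xs)) :=
                  mem_le_pvMaxF _ _ _ (by simp)
                simp only [beq_iff_eq]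
                omega
              have hsplit : (c0 :: (rest ++ (x :: xs))) = (c0 :: rest) ++ (x :: xs) := by simp
              rw [hsplit, List.filter_append, hnil1, List.nil_append]
    · -- tie with the maximum: x appended
      have hstep : pvStep ((c0 :: rest).filter (fun c => pvVal c == M)) x
          = (c0 :: rest).filter (fun c => pvVal c == M) ++ [x] := by
        rw [hft]; simp [pvStep, hhM, ← heq]
      have hMx : pvMaxF (pvVal c0) (rest ++ [x]) = M := by
        rw [hMapp, ← heq, max_self]
      have hfilt : (c0 :: (rest ++ [x])).filter (fun c => pvVal c == pvMaxF (pvVal c0) (rest ++ [x]))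
          = (c0 :: rest).filter (fun c => pvVal c == M) ++ [x] := by
        rw [hMx]
        have hsplit : (c0 :: (rest ++ [x])) = (c0 :: rest) ++ [x] := by simp
        rw [hsplit, List.filter_append]
        simp [← heq]
      calc List.foldl pvStep ((c0 :: rest).filter (fun c => pvVal c == M)) (x :: xs)
          = List.foldl pvStep ((c0 :: rest).filter (fun c => pvVal c == M) ++ [x]) xs := by
            rw [List.foldl_cons, hstep]
        _ = List.foldl pvStep ((c0 :: (rest ++ [x])).filter
              (fun c => pvVal c == pvMaxF (pvVal c0) (rest ++ [x]))) xs := by rw [hfilt]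
        _ = (c0 :: ((rest ++ [x]) ++ xs)).filter
              (fun c => pvVal c == pvMaxF (pvVal c0) ((rest ++ [x]) ++ xs)) := ih c0 (rest ++ [x])
        _ = (c0 :: (rest ++ (x :: xs))).filter
              (fun c => pvVal c == pvMaxF (pvVal c0) (rest ++ (x :: xs))) := by
            have : (rest ++ [x]) ++ xs = rest ++ (x :: xs) := by simp
            rw [this]
    · -- below the maximum: accumulator unchanged
      have hstep : pvStep ((c0 :: rest).filter (fun c => pvVal c == M)) x
          = (c0 :: rest).filter (fun c => pvVal c == M) := by
        rw [hft]; simp only [pvStep, hhM]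
        rw [if_neg (by omega), if_neg (by omega)]
      have hMx : pvMaxF (pvVal c0) (rest ++ [x]) = M := by
        rw [hMapp, max_eq_left hgt.le]
      have hfilt : (c0 :: rest).filter (fun c => pvVal c == M)
          = (c0 :: (rest ++ [x])).filter (fun c => pvVal c == pvMaxF (pvVal c0) (rest ++ [x])) := by
        rw [hMx]
        have hsplit : (c0 :: (rest ++ [x])) = (c0 :: rest) ++ [x] := by simp
        rw [hsplit, List.filter_append]
        have : [x].filter (fun c => pvVal c == M) = [] := by
          simp only [List.filter_cons, List.filter_nil, beq_iff_eq]
          rw [if_neg (by omega)]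
        rw [this, List.append_nil]
      calc List.foldl pvStep ((c0 :: rest).filter (fun c => pvVal c == M)) (x :: xs)
          = List.foldl pvStep ((c0 :: (rest ++ [x])).filter
              (fun c => pvVal c == pvMaxF (pvVal c0) (rest ++ [x]))) xs := by
            rw [List.foldl_cons, hstep, hfilt]
        _ = (c0 :: ((rest ++ [x]) ++ xs)).filter
              (fun c => pvVal c == pvMaxF (pvVal c0) ((rest ++ [x]) ++ xs)) := ih c0 (rest ++ [x])
        _ = (c0 :: (rest ++ (x :: xs))).filter
              (fun c => pvVal c == pvMaxF (pvVal c0) (rest ++ (x :: xs))) := by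
            have : (rest ++ [x]) ++ xs = rest ++ (x :: xs) := by simp
            rw [this]

-- ===== VERDICT (by name: the statement is the Claim_ definition above) =====
theorem trouver_cartes_gagnantes_spec : Claim_equal_trouver_cartes_gagnantes := by
  intro cartes_jouees _ _
  unfold Spec_trouver_cartes_gagnantes
  match cartes_jouees with
  | [] => rfl
  | [c] => rfl
  | c0 :: x :: xs =>
    show List.foldl pvStep [] (c0 :: x :: xs) = trouver_cartes_gagnantes_alt (c0 :: x :: xs)
    have h0 : List.foldl pvStep [] (c0 :: x :: xs) = List.foldl pvStep [c0] (x :: xs) := by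
      rw [List.foldl_cons]; rfl
    have h1 : [c0] = (c0 :: ([] : List String)).filter
        (fun c => pvVal c == pvMaxF (pvVal c0) []) := by
      simp [pvMaxF]
    have halt : trouver_cartes_gagnantes_alt (c0 :: x :: xs)
        = (c0 :: (x :: xs)).filter
            (fun c => pvVal c == pvMaxF (pvVal c0) (x :: xs)) := by
      simp [trouver_cartes_gagnantes_alt, pvMaxF]
    rw [h0, h1, pv_loop_inv (x :: xs) c0 [], halt]
    simp
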